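-- pv_equiv track=rewrite | github.com/arishya7/Meraki | Backend/services/predictive_intelligence.py | _find_relevant_advisory
-- ===== SOURCE A (Python) =====
-- from typing import List, Dict, Any, Optional
--
-- def _find_relevant_advisory(
--
--     category: str,
--     cause: str,
--     advisories: List[str]
-- ) -> str:
--     """Find relevant health advisory based on claim history."""
--     if not advisories:
--         return "there are some travel health considerations."
--
--     # Match advisory to claim cause
--     for advisory in advisories:
--         if category == "medical":
--             # Check for related health issues
--             if any(kw in cause for kw in ["flu", "fever", "respiratory"]) and "influenza" in advisory:
--                 return f"there's currently {advisory}"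
--             elif any(kw in cause for kw in ["dengue", "mosquito"]) and "dengue" in advisory:
--                 return f"there's {advisory} in the area"
--             elif any(kw in cause for kw in ["food", "stomach", "diarrhea"]) and "food" in advisory:
--                 return f"{advisory} is common there"
--
--     # Default advisory
--     return f"please note: {advisories[0]}"
-- ===== SOURCE B (Python) =====
-- from typing import List, Optional, Tuple
--
-- _DEFAULT_NONE = "there are some travel health considerations."
--
--
-- def _first_match(sub: str, xs: List[str]) -> Optional[Tuple[int, str]]:
--     """Index and value of the first string in xs containing sub, else None."""
--     for i, x in enumerate(xs):
--         if sub in x: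
--             return (i, x)
--     return None
--
--
-- def _find_relevant_advisory(
--     category: str,
--     cause: str,
--     advisories: List[str]
-- ) -> str:
--     """Find relevant health advisory based on claim history.
--
--     Runs one independent first-occurrence search per active rule, then picks
--     the lexicographically smallest (advisory index, rule rank) candidate,
--     which reproduces the original advisory-major / rule-minor priority.
--     """
--     if not advisories:
--         return _DEFAULT_NONE
--
--     if category == "medical":
--         candidates = []
--         if any(kw in cause for kw in ("flu", "fever", "respiratory")):
--             hit = _first_match("influenza", advisories)
--             if hit is not None:
--                 candidates.append((hit[0], 0, hit[1]))
--         if any(kw in cause for kw in ("dengue", "mosquito")):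
--             hit = _first_match("dengue", advisories)
--             if hit is not None:
--                 candidates.append((hit[0], 1, hit[1]))
--         if any(kw in cause for kw in ("food", "stomach", "diarrhea")):
--             hit = _first_match("food", advisories)
--             if hit is not None:
--                 candidates.append((hit[0], 2, hit[1]))
--         if candidates:
--             _, r, a = min(candidates)
--             return ["there's currently " + a,
--                     "there's " + a + " in the area",
--                     a + " is common there"][r]
--
--     return "please note: " + advisories[0]
-- ===== Notes on version B (the rewrite author's own statement) =====
-- stated objective: alternative
-- what changed: Instead of one advisory-major scan testing every rule per advisory, B runs at most three independent first-occurrence searches (one per active rule) and picks the lexicographically smallest (advisory index, rule rank) candidate, which provably reproduces the original priority.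
import Mathlib
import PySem

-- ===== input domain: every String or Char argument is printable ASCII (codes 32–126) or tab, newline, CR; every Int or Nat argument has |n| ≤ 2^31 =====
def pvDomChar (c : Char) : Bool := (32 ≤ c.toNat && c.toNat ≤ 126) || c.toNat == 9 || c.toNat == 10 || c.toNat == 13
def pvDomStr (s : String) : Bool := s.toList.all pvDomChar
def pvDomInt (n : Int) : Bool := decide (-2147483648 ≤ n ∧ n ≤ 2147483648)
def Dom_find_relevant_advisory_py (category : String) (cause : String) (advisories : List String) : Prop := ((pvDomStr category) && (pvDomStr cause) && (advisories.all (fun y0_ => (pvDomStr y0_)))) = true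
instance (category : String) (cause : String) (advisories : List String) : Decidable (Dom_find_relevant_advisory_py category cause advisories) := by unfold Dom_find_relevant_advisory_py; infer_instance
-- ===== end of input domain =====

-- B replaces the single advisory-major scan by three independent per-rule
-- first-occurrence searches whose results are combined by a lexicographic
-- (advisory index, rule rank) minimum (alternative algorithm, same cost).

-- ===== PORT A =====
-- the `for advisory in advisories` loop with its early returns (some = returned)
def pvA_loop (category cause : String) : List String → Option String
  | [] => none
  | advisory :: rest =>
    if category == "medical" then
      if (["flu", "fever", "respiratory"].any (fun kw => PySem.Str.isIn kw cause))
          && PySem.Str.isIn "influenza" advisory then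
        some ("there's currently " ++ advisory)
      else if (["dengue", "mosquito"].any (fun kw => PySem.Str.isIn kw cause))
          && PySem.Str.isIn "dengue" advisory then
        some ("there's " ++ advisory ++ " in the area")
      else if (["food", "stomach", "diarrhea"].any (fun kw => PySem.Str.isIn kw cause))
          && PySem.Str.isIn "food" advisory then
        some (advisory ++ " is common there")
      else pvA_loop category cause rest
    else pvA_loop category cause rest

def find_relevant_advisory_py (category : String) (cause : String) (advisories : List String) : String :=
  if advisories = [] then "there are some travel health considerations."
  else
    match pvA_loop category cause advisories with
    | some r => r
    | none => "please note: " ++ advisories.headD ""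

-- ===== PORT B =====
-- _first_match: index and value of the first string containing sub (enumerate loop)
def pvFirstMatch (sub : String) : List String → Option (Nat × String)
  | [] => none
  | x :: rest =>
    if PySem.Str.isIn sub x then some (0, x)
    else (pvFirstMatch sub rest).map (fun p => (p.1 + 1, p.2))

-- one candidate list entry `(hit[0], r, hit[1])` per matched active rule
def pvToCand (r : Nat) : Option (Nat × String) → List (Nat × Nat × String)
  | none => []
  | some (i, a) => [(i, r, a)]

-- Python's tuple `<` on (index, rank, advisory), lexicographic
def pvLt (c b : Nat × Nat × String) : Bool :=
  decide (c.1 < b.1 ∨ (c.1 = b.1 ∧ (c.2.1 < b.2.1 ∨ (c.2.1 = b.2.1 ∧ c.2.2 < b.2.2))))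

-- `min(candidates)`: leftmost minimum under pvLt (Python keeps the first on ties)
def pvMin? : List (Nat × Nat × String) → Option (Nat × Nat × String)
  | [] => none
  | h :: t => some (t.foldl (fun b c => if pvLt c b then c else b) h)

-- the templates list indexed by the winning rule rank
def pvTmpl (r : Nat) (a : String) : String :=
  match r with
  | 0 => "there's currently " ++ a
  | 1 => "there's " ++ a ++ " in the area"
  | _ => a ++ " is common there"

def find_relevant_advisory_py_alt (category : String) (cause : String) (advisories : List String) : String :=
  if advisories = [] then "there are some travel health considerations."
  else if category == "medical" then
    let c1 := if ["flu", "fever", "respiratory"].any (fun kw => PySem.Str.isIn kw cause)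
              then pvFirstMatch "influenza" advisories else none
    let c2 := if ["dengue", "mosquito"].any (fun kw => PySem.Str.isIn kw cause)
              then pvFirstMatch "dengue" advisories else none
    let c3 := if ["food", "stomach", "diarrhea"].any (fun kw => PySem.Str.isIn kw cause)
              then pvFirstMatch "food" advisories else none
    match pvMin? (pvToCand 0 c1 ++ pvToCand 1 c2 ++ pvToCand 2 c3) with
    | some (_, r, a) => pvTmpl r a
    | none => "please note: " ++ advisories.headD ""
  else "please note: " ++ advisories.headD ""

-- ===== PRECONDITION & SPEC =====
def Spec_find_relevant_advisory_py (category : String) (cause : String) (advisories : List String) (out : String) : Prop := out = find_relevant_advisory_py_alt category cause advisories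
instance (category : String) (cause : String) (advisories : List String) (out : String) : Decidable (Spec_find_relevant_advisory_py category cause advisories out) := by unfold Spec_find_relevant_advisory_py; infer_instance

-- ===== CLAIM (what is proved, stated in full; the proofs are below) =====
def Claim_equal_find_relevant_advisory_py : Prop := ∀ (category : String) (cause : String) (advisories : List String), Dom_find_relevant_advisory_py category cause advisories → Spec_find_relevant_advisory_py category cause advisories (find_relevant_advisory_py category cause advisories)

-- ===== LEMMAS AND PROOFS =====

-- B's candidate/min/template pipeline as one Option-valued function
def pvChoose (c1 c2 c3 : Option (Nat × String)) : Option String :=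
  (pvMin? (pvToCand 0 c1 ++ pvToCand 1 c2 ++ pvToCand 2 c3)).map (fun p => pvTmpl p.2.1 p.2.2)

def pvShift (o : Option (Nat × String)) : Option (Nat × String) :=
  o.map (fun p => (p.1 + 1, p.2))

-- A's loop with the cause flags abstracted out
def pvLoopF (f1 f2 f3 : Bool) : List String → Option String
  | [] => none
  | a :: rest =>
    if f1 && PySem.Str.isIn "influenza" a then some ("there's currently " ++ a)
    else if f2 && PySem.Str.isIn "dengue" a then some ("there's " ++ a ++ " in the area")
    else if f3 && PySem.Str.isIn "food" a then some (a ++ " is common there")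
    else pvLoopF f1 f2 f3 rest

-- B's per-rule candidate on a cons, expressed through pvShift
theorem pvCand_cons (f : Bool) (m a : String) (l : List String) :
    (if f then pvFirstMatch m (a :: l) else none)
      = (if f && PySem.Str.isIn m a then some (0, a)
         else pvShift (if f then pvFirstMatch m l else none)) := by
  cases f <;> simp [pvFirstMatch, pvShift] <;> split <;> simp

theorem pvChoose_fst (a : String) (c2 c3 : Option (Nat × String)) :
    pvChoose (some (0, a)) c2 c3 = some (pvTmpl 0 a) := by
  rcases c2 with _ | ⟨i2, a2⟩ <;> rcases c3 with _ | ⟨i3, a3⟩ <;>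
    simp only [pvChoose, pvToCand, pvMin?, pvLt, List.append_nil, List.nil_append,
      List.cons_append, List.foldl, Option.map_some] <;>
    (repeat' split) <;> simp_all <;> omega

theorem pvChoose_snd (a : String) (o1 c3 : Option (Nat × String)) :
    pvChoose (pvShift o1) (some (0, a)) c3 = some (pvTmpl 1 a) := by
  rcases o1 with _ | ⟨i1, a1⟩ <;> rcases c3 with _ | ⟨i3, a3⟩ <;>
    simp only [pvChoose, pvShift, pvToCand, pvMin?, pvLt, Option.map_some, Option.map_none,
      List.append_nil, List.nil_append, List.cons_append, List.foldl] <;>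
    (repeat' split) <;> simp_all <;> omega

theorem pvChoose_trd (a : String) (o1 o2 : Option (Nat × String)) :
    pvChoose (pvShift o1) (pvShift o2) (some (0, a)) = some (pvTmpl 2 a) := by
  rcases o1 with _ | ⟨i1, a1⟩ <;> rcases o2 with _ | ⟨i2, a2⟩ <;>
    simp only [pvChoose, pvShift, pvToCand, pvMin?, pvLt, Option.map_some, Option.map_none,
      List.append_nil, List.nil_append, List.cons_append, List.foldl] <;>
    (repeat' split) <;> simp_all <;> omega

theorem pvChoose_shift (o1 o2 o3 : Option (Nat × String)) :
    pvChoose (pvShift o1) (pvShift o2) (pvShift o3) = pvChoose o1 o2 o3 := by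
  rcases o1 with _ | ⟨i1, a1⟩ <;> rcases o2 with _ | ⟨i2, a2⟩ <;> rcases o3 with _ | ⟨i3, a3⟩ <;>
    simp only [pvChoose, pvShift, pvToCand, pvMin?, pvLt, Option.map_some, Option.map_none,
      List.append_nil, List.nil_append, List.cons_append, List.foldl] <;>
    (repeat' split) <;> simp_all <;> omega

-- one cons step, fully abstracted over the three tests and tail searches
theorem pvStep (b1 b2 b3 : Bool) (a : String) (o1 o2 o3 : Option (Nat × String))
    (z : Option String) (hz : z = pvChoose o1 o2 o3) :
    (if b1 then some ("there's currently " ++ a)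
     else if b2 then some ("there's " ++ a ++ " in the area")
     else if b3 then some (a ++ " is common there")
     else z)
      = pvChoose (if b1 then some (0, a) else pvShift o1)
                 (if b2 then some (0, a) else pvShift o2)
                 (if b3 then some (0, a) else pvShift o3) := by
  cases b1 <;> cases b2 <;> cases b3 <;>
    simp [hz, pvChoose_fst, pvChoose_snd, pvChoose_trd, pvChoose_shift, pvTmpl]

-- main: A's flagged scan equals B's three-searches-plus-min pipeline
theorem pvLoopF_eq_choose (f1 f2 f3 : Bool) (l : List String) :
    pvLoopF f1 f2 f3 l
      = pvChoose (if f1 then pvFirstMatch "influenza" l else none)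
                 (if f2 then pvFirstMatch "dengue" l else none)
                 (if f3 then pvFirstMatch "food" l else none) := by
  induction l with
  | nil => cases f1 <;> cases f2 <;> cases f3 <;> rfl
  | cons a rest ih =>
    rw [pvCand_cons, pvCand_cons, pvCand_cons]
    exact pvStep _ _ _ a _ _ _ _ ih

theorem pvA_loop_eq_loopF (category cause : String) (l : List String)
    (h : category == "medical") :
    pvA_loop category cause l
      = pvLoopF (["flu", "fever", "respiratory"].any (fun kw => PySem.Str.isIn kw cause))
                (["dengue", "mosquito"].any (fun kw => PySem.Str.isIn kw cause))
                (["food", "stomach", "diarrhea"].any (fun kw => PySem.Str.isIn kw cause)) l := by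
  induction l with
  | nil => rfl
  | cons a rest ih => simp only [pvA_loop, pvLoopF, h, if_true, ih]

theorem pvA_loop_none (category cause : String) (l : List String)
    (h : ¬ category == "medical") : pvA_loop category cause l = none := by
  induction l with
  | nil => rfl
  | cons a rest ih => simp [pvA_loop, h, ih]

-- ===== VERDICT (by name: the statement is the Claim_ definition above) =====
theorem find_relevant_advisory_py_spec : Claim_equal_find_relevant_advisory_py := by
  intro category cause advisories _
  unfold Spec_find_relevant_advisory_py find_relevant_advisory_py find_relevant_advisory_py_alt
  by_cases hm : category == "medical"
  · rw [pvA_loop_eq_loopF category cause advisories hm, pvLoopF_eq_choose]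
    simp only [hm, if_true]
    unfold pvChoose
    cases pvMin? (pvToCand 0 _ ++ pvToCand 1 _ ++ pvToCand 2 _) with
    | none => simp
    | some p => simp
  · rw [pvA_loop_none category cause advisories hm]
    simp [hm]
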